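-- pv_equiv track=rewrite | github.com/10xsai/data_structures_and_algorithms_specialization | algorithms_toolbox/week5_dynamic_programming1/2_primitive_calculator/primitive_calculator.py | compute_steps
-- ===== SOURCE A (Python) =====
-- def compute_steps(n):
--     steps = [10**8 for _ in range(n+1)]
--     steps[0], steps[1] = 0, 0
--     for curr in range(2, n+1):
--         s1 = steps[curr-1] + 1
--         s2, s3 = 10**8, 10**8
--         if curr%2==0:
--             s2 = steps[curr//2] + 1
--         if curr%3==0:
--             s3 = steps[curr//3] + 1
--         min_s = min((s1, s2, s3))
--         steps[curr] = min_s
--     return steps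
-- ===== SOURCE B (Python) =====
-- def _relax(steps, idx, base, n):
--     # lower steps[idx] to base if the cell exists and base is smaller
--     if idx <= n:
--         steps[idx] = min(steps[idx], base)
--
--
-- def compute_steps(n):
--     # Forward ("push") DP: each reached number i relaxes its successors
--     # i+1, 2*i, 3*i, instead of each cell pulling from its predecessors.
--     steps = [10**8] * (n + 1)
--     steps[0], steps[1] = 0, 0
--     for i in range(1, n + 1):
--         base = steps[i] + 1
--         _relax(steps, i + 1, base, n)
--         _relax(steps, 2 * i, base, n)
--         _relax(steps, 3 * i, base, n)
--     return steps
-- ===== Notes on version B (the rewrite author's own statement) =====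
-- stated objective: alternative
-- what changed: Replaces A's backward pull DP (each cell reads its three predecessors steps[c-1], steps[c//2], steps[c//3] with parity/divisibility tests) by a forward push DP in which each source i relaxes its successors i+1, 2*i, 3*i with min(existing, steps[i]+1) guarded by index <= n; exactly the same values come out through reversed edges.
import Mathlib
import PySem

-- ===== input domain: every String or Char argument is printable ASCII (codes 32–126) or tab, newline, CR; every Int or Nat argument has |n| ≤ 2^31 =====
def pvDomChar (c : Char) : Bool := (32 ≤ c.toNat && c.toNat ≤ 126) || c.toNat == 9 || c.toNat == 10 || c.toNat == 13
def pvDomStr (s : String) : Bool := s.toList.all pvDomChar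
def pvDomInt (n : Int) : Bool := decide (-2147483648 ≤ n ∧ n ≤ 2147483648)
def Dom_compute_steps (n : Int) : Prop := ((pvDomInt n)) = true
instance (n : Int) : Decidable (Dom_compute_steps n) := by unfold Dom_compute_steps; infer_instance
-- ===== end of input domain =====

-- B replaces A's backward pull DP by a forward push DP (each i relaxes successors i+1, 2i, 3i); same values, alternative traversal.

-- ===== PORT A =====
-- backward "pull" DP: cell curr reads its predecessors curr-1, curr//2, curr//3
def compute_steps (n : Int) : List Int :=
  let steps := (PySem.List.pyRange 0 (n+1) 1).map (fun _ => (100000000 : Int))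
  let steps := PySem.List.pySetD steps 0 0
  let steps := PySem.List.pySetD steps 1 0
  (PySem.List.pyRange 2 (n+1) 1).foldl (fun steps curr =>
    let s1 := PySem.List.pyGetD steps (curr - 1) 0 + 1
    let s2 := if PySem.Int.mod curr 2 = 0 then
                PySem.List.pyGetD steps (PySem.Int.floordiv curr 2) 0 + 1 else 100000000
    let s3 := if PySem.Int.mod curr 3 = 0 then
                PySem.List.pyGetD steps (PySem.Int.floordiv curr 3) 0 + 1 else 100000000
    PySem.List.pySetD steps curr (min s1 (min s2 s3))) steps

-- ===== PORT B =====
-- _relax(steps, idx, base, n)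
def relaxB (n : Int) (steps : List Int) (idx : Int) (base : Int) : List Int :=
  if idx ≤ n then PySem.List.pySetD steps idx (min (PySem.List.pyGetD steps idx 0) base)
  else steps

-- forward "push" DP: source i relaxes its successors i+1, 2*i, 3*i
def compute_steps_alt (n : Int) : List Int :=
  let steps := List.replicate (n+1).toNat (100000000 : Int)
  let steps := PySem.List.pySetD steps 0 0
  let steps := PySem.List.pySetD steps 1 0
  (PySem.List.pyRange 1 (n+1) 1).foldl (fun steps i =>
    let base := PySem.List.pyGetD steps i 0 + 1
    let steps := relaxB n steps (i+1) base
    let steps := relaxB n steps (2*i) base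
    relaxB n steps (3*i) base) steps

-- ===== PRECONDITION & SPEC =====
-- Python A raises IndexError (at steps[1] = 0) for every n <= 0; so does B.
def Pre_compute_steps (n : Int) : Prop := 1 ≤ n
instance (n : Int) : Decidable (Pre_compute_steps n) := by unfold Pre_compute_steps; infer_instance
def pvWitness_compute_steps : Int := (5)

def Spec_compute_steps (n : Int) (out : List Int) : Prop := out = compute_steps_alt n
instance (n : Int) (out : List Int) : Decidable (Spec_compute_steps n out) := by unfold Spec_compute_steps; infer_instance

-- ===== CLAIM (what is proved, stated in full; the proofs are below) =====
def Claim_equal_compute_steps : Prop :=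
  ∀ (n : Int), Dom_compute_steps n → Pre_compute_steps n → Spec_compute_steps n (compute_steps n)

-- ===== LEMMAS AND PROOFS =====

-- the common value table: minimum operations (with A's 10^8 sentinel folded into the recurrence)
def mval : Nat → Int
  | 0 => 0
  | 1 => 0
  | (k+2) =>
    min (mval (k+1) + 1)
        (min (if (k+2) % 2 = 0 then mval ((k+2)/2) + 1 else 100000000)
             (if (k+2) % 3 = 0 then mval ((k+2)/3) + 1 else 100000000))
  decreasing_by all_goals omega

lemma mval_zero : mval 0 = 0 := by rw [mval]
lemma mval_one : mval 1 = 0 := by rw [mval]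
lemma mval_add_two (k : Nat) : mval (k+2) =
    min (mval (k+1) + 1)
        (min (if (k+2) % 2 = 0 then mval ((k+2)/2) + 1 else 100000000)
             (if (k+2) % 3 = 0 then mval ((k+2)/3) + 1 else 100000000)) := by rw [mval]

lemma mval_le_succ (k : Nat) : mval (k+2) ≤ mval (k+1) + 1 := by
  rw [mval_add_two]; exact min_le_left _ _

lemma mval_le_half (k : Nat) (h : (k+2) % 2 = 0) : mval (k+2) ≤ mval ((k+2)/2) + 1 := by
  rw [mval_add_two]
  refine le_trans (min_le_right _ _) (le_trans (min_le_left _ _) ?_)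
  rw [if_pos h]

lemma mval_le_pow : ∀ (t j : Nat), j ≤ 2^t → mval j ≤ 2*(t:Int) := by
  intro t
  induction t with
  | zero =>
    intro j hj
    simp only [pow_zero] at hj
    interval_cases j
    · simp [mval_zero]
    · simp [mval_one]
  | succ t ih =>
    intro j hj
    have hp : (2:Nat)^(t+1) = 2 * 2^t := by ring
    match j, hj with
    | 0, _ => rw [mval_zero]; push_cast; omega
    | 1, _ => rw [mval_one]; push_cast; omega
    | (k+2), hj =>
      by_cases he : (k+2) % 2 = 0
      · have hle := mval_le_half k he
        have h2 : (k+2)/2 ≤ 2^t := by omega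
        have := ih _ h2
        push_cast at *; omega
      · have hk : 1 ≤ k := by omega
        have hle := mval_le_succ k
        have ho : (k+1) % 2 = 0 := by omega
        have hle2 : mval (k+1) ≤ mval ((k+1)/2) + 1 := by
          have h := mval_le_half (k-1) (by omega)
          have e : k - 1 + 2 = k + 1 := by omega
          rw [e] at h; exact h
        have h2 : (k+1)/2 ≤ 2^t := by omega
        have := ih _ h2
        push_cast at *; omega

lemma mval_small {j : Nat} (h : j ≤ 2^31) : mval j ≤ 64 := by
  have := mval_le_pow 31 j h; omega

lemma mval_eq (j : Nat) (h : 2 ≤ j) : mval j =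
    min (mval (j-1) + 1)
        (min (if j % 2 = 0 then mval (j/2) + 1 else 100000000)
             (if j % 3 = 0 then mval (j/3) + 1 else 100000000)) := by
  obtain ⟨k, rfl⟩ : ∃ k, j = k+2 := ⟨j-2, by omega⟩
  rw [mval_add_two]
  norm_num

lemma mval_two : mval 2 = 1 := by
  have h := mval_add_two 0
  norm_num [mval_one] at h
  exact h

-- A's array after processing 2..c
def stateA (c N : Nat) : List Int :=
  (List.range (N+1)).map (fun j => if j ≤ c then mval j else 100000000)

-- pending (partial) value of a not-yet-final cell j ≥ i+2 of B after sources 1..i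
def pval (i j : Nat) : Int :=
  min (if j % 2 = 0 ∧ 2 ≤ j ∧ j / 2 ≤ i then mval (j/2) + 1 else 100000000)
      (min (if j % 3 = 0 ∧ 3 ≤ j ∧ j / 3 ≤ i then mval (j/3) + 1 else 100000000) 100000000)

-- B's array after processing sources 1..i
def stateB (i N : Nat) : List Int :=
  (List.range (N+1)).map (fun j => if j ≤ i+1 then mval j else pval i j)

-- ---------- A side ----------

def stepAfun (st : List Int) (curr : Int) : List Int :=
  let s1 := PySem.List.pyGetD st (curr - 1) 0 + 1
  let s2 := if PySem.Int.mod curr 2 = 0 then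
              PySem.List.pyGetD st (PySem.Int.floordiv curr 2) 0 + 1 else 100000000
  let s3 := if PySem.Int.mod curr 3 = 0 then
              PySem.List.pyGetD st (PySem.Int.floordiv curr 3) 0 + 1 else 100000000
  PySem.List.pySetD st curr (min s1 (min s2 s3))

lemma getD_stateA (c N a : Nat) (ha : a < N+1) :
    (stateA c N).getD a 0 = if a ≤ c then mval a else 100000000 := by
  unfold stateA
  rw [List.getD_eq_getElem _ _ (by simpa using ha)]
  simp

lemma stepA_state (N c : Nat) (h1 : 1 ≤ c) (h2 : c + 1 ≤ N) :
    stepAfun (stateA c N) ((c:Int)+1) = stateA (c+1) N := by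
  unfold stepAfun
  have hcast : ((c:Int)+1) = ((c+1:Nat):Int) := by push_cast; ring
  have hsub : ((c:Int)+1-1) = ((c:Nat):Int) := by ring
  rw [hsub, hcast]
  have hm2 : PySem.Int.mod ((c+1:Nat):Int) 2 = (((c+1)%2 : Nat) : Int) := by
    exact_mod_cast PySem.Int.mod_natCast (c+1) 2
  have hm3 : PySem.Int.mod ((c+1:Nat):Int) 3 = (((c+1)%3 : Nat) : Int) := by
    exact_mod_cast PySem.Int.mod_natCast (c+1) 3
  have hd2 : PySem.Int.floordiv ((c+1:Nat):Int) 2 = (((c+1)/2 : Nat) : Int) := by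
    exact_mod_cast PySem.Int.floordiv_natCast (c+1) 2
  have hd3 : PySem.Int.floordiv ((c+1:Nat):Int) 3 = (((c+1)/3 : Nat) : Int) := by
    exact_mod_cast PySem.Int.floordiv_natCast (c+1) 3
  rw [hm2, hm3, hd2, hd3]
  rw [PySem.List.pyGetD_natCast, PySem.List.pyGetD_natCast, PySem.List.pyGetD_natCast,
      PySem.List.pySetD_natCast]
  rw [getD_stateA c N c (by omega), getD_stateA c N ((c+1)/2) (by omega),
      getD_stateA c N ((c+1)/3) (by omega)]
  rw [if_pos (le_refl c), if_pos (show (c+1)/2 ≤ c by omega), if_pos (show (c+1)/3 ≤ c by omega)]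
  have hv : min (mval c + 1)
      (min (if (((c+1)%2 : Nat):Int) = 0 then mval ((c+1)/2) + 1 else 100000000)
           (if (((c+1)%3 : Nat):Int) = 0 then mval ((c+1)/3) + 1 else 100000000)) = mval (c+1) := by
    have g2 : ((((c+1)%2 : Nat):Int) = 0) = ((c+1) % 2 = 0) := by
      apply propext; omega
    have g3 : ((((c+1)%3 : Nat):Int) = 0) = ((c+1) % 3 = 0) := by
      apply propext; omega
    simp only [g2, g3]
    rw [mval_eq (c+1) (by omega)]
    rw [show c+1-1 = c from by omega]
  rw [hv]
  apply List.ext_getElem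
  · simp [stateA]
  · intro j hj1 hj2
    simp only [stateA, List.getElem_set, List.getElem_map, List.getElem_range]
    by_cases hj : c+1 = j
    · subst hj; rw [if_pos rfl, if_pos (le_refl _)]
    · rw [if_neg hj]
      by_cases hjc : j ≤ c
      · rw [if_pos hjc, if_pos (by omega)]
      · rw [if_neg hjc, if_neg (by omega)]

lemma initA (N : Nat) :
    PySem.List.pySetD (PySem.List.pySetD
      ((PySem.List.pyRange 0 ((N:Int)+1) 1).map (fun _ => (100000000:Int))) 0 0) 1 0
    = stateA 1 N := by
  rw [PySem.List.pySetD_of_nonneg _ _ (show (0:Int) ≤ 1 by norm_num),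
      PySem.List.pySetD_of_nonneg _ _ (show (0:Int) ≤ 0 by norm_num)]
  norm_num
  apply List.ext_getElem
  · simp [stateA]
  · intro j hj1 hj2
    simp only [stateA, List.getElem_set, List.getElem_map, List.getElem_range,
      List.getElem_replicate]
    by_cases hj0 : j = 0
    · subst hj0; simp [mval_zero]
    · by_cases hjo : j = 1
      · subst hjo; simp [mval_one]
      · rw [if_neg (by omega), if_neg (by omega), if_neg (by omega)]

lemma foldA (N : Nat) (h1 : 1 ≤ N) : ∀ k, k ≤ N - 1 →
    (PySem.List.pyRange 2 ((k:Int)+2) 1).foldl stepAfun (stateA 1 N) = stateA (k+1) N := by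
  intro k
  induction k with
  | zero =>
    intro _
    rw [PySem.List.pyRange_one_eq_nil (by omega)]
    rfl
  | succ k ih =>
    intro hk
    have e : ((k+1:Nat):Int)+2 = ((k:Int)+2)+1 := by push_cast; ring
    rw [e, PySem.List.pyRange_one_succ_right (by omega), List.foldl_append,
        ih (by omega)]
    simp only [List.foldl_cons, List.foldl_nil]
    have e2 : ((k:Int)+2) = ((k+1:Nat):Int)+1 := by push_cast; ring
    rw [e2, stepA_state N (k+1) (by omega) (by omega)]

lemma A_eq (N : Nat) (h1 : 1 ≤ N) : compute_steps (N : Int) = stateA N N := by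
  have h0 : compute_steps (N : Int) =
      (PySem.List.pyRange 2 ((N:Int)+1) 1).foldl stepAfun
        (PySem.List.pySetD (PySem.List.pySetD
          ((PySem.List.pyRange 0 ((N:Int)+1) 1).map (fun _ => (100000000:Int))) 0 0) 1 0) := rfl
  rw [h0, initA N]
  have e : ((N:Int)+1) = ((N-1:Nat):Int)+2 := by push_cast [h1]; omega
  rw [e, foldA N h1 (N-1) (by omega)]
  congr 1
  omega

-- ---------- B side ----------

def stepBfun (n : Int) (st : List Int) (i : Int) : List Int :=
  let base := PySem.List.pyGetD st i 0 + 1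
  let st := relaxB n st (i+1) base
  let st := relaxB n st (2*i) base
  relaxB n st (3*i) base

lemma relax_map (N a : Nat) (f : Nat → Int) (b : Int) :
    relaxB (N:Int) ((List.range (N+1)).map f) (a:Int) b
    = (List.range (N+1)).map (fun j => if j = a then min (f j) b else f j) := by
  unfold relaxB
  by_cases ha : a ≤ N
  · rw [if_pos (by exact_mod_cast ha), PySem.List.pySetD_natCast, PySem.List.pyGetD_natCast]
    rw [List.getD_eq_getElem _ _ (by simp; omega)]
    apply List.ext_getElem
    · simp
    · intro j hj1 hj2
      simp only [List.getElem_set, List.getElem_map, List.getElem_range]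
      by_cases hj : a = j
      · subst hj; simp
      · rw [if_neg hj, if_neg (by omega)]
  · rw [if_neg (by exact_mod_cast ha)]
    apply List.ext_getElem
    · simp
    · intro j hj1 hj2
      have hjN : j < N + 1 := by simpa using hj1
      simp only [List.getElem_map, List.getElem_range]
      rw [if_neg (by omega)]

lemma pval_zero (j : Nat) (h : 2 ≤ j) : pval 0 j = 100000000 := by
  unfold pval
  rw [if_neg (by omega), if_neg (by omega)]
  simp

-- the three keys: how a relaxation merges into the table
lemma key1 (s : Nat) (h1 : 1 ≤ s) (hs : s ≤ 2^31) :
    min (pval (s-1) (s+1)) (mval s + 1) = mval (s+1) := by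
  have hbs : mval s + 1 ≤ 100000000 := by have := mval_small hs; omega
  by_cases hs1 : s = 1
  · subst hs1
    rw [pval_zero 2 (by omega), mval_one, mval_two]
    norm_num
  · have hs2 : 2 ≤ s := by omega
    rw [mval_eq (s+1) (by omega), show s+1-1 = s from by omega]
    unfold pval
    have g2 : ((s+1) % 2 = 0 ∧ 2 ≤ s+1 ∧ (s+1) / 2 ≤ s-1) = ((s+1) % 2 = 0) := by
      apply propext; constructor
      · intro h; exact h.1
      · intro h; exact ⟨h, by omega, by omega⟩
    have g3 : ((s+1) % 3 = 0 ∧ 3 ≤ s+1 ∧ (s+1) / 3 ≤ s-1) = ((s+1) % 3 = 0) := by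
      apply propext; constructor
      · intro h; exact h.1
      · intro h; exact ⟨h, by omega, by omega⟩
    simp only [g2, g3]
    have b2 : mval ((s+1)/2) + 1 ≤ 100000000 := by
      have := mval_small (show (s+1)/2 ≤ 2^31 from by omega); omega
    have b3 : mval ((s+1)/3) + 1 ≤ 100000000 := by
      have := mval_small (show (s+1)/3 ≤ 2^31 from by omega); omega
    by_cases h2 : (s+1) % 2 = 0 <;> by_cases h3 : (s+1) % 3 = 0 <;>
      simp only [h2, h3, if_true, if_false] <;> omega

lemma key2 (s : Nat) (h1 : 2 ≤ s) (hs : s ≤ 2^31) :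
    min (pval (s-1) (2*s)) (mval s + 1) = pval s (2*s) := by
  have hbs : mval s + 1 ≤ 100000000 := by have := mval_small hs; omega
  unfold pval
  rw [if_neg (show ¬(2*s % 2 = 0 ∧ 2 ≤ 2*s ∧ 2*s/2 ≤ s-1) from by omega),
      if_pos (show 2*s % 2 = 0 ∧ 2 ≤ 2*s ∧ 2*s/2 ≤ s from by omega),
      show 2*s/2 = s from by omega]
  have g3 : (2*s % 3 = 0 ∧ 3 ≤ 2*s ∧ 2*s/3 ≤ s-1) = (2*s % 3 = 0 ∧ 3 ≤ 2*s ∧ 2*s/3 ≤ s) := by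
    apply propext; omega
  simp only [g3]
  by_cases h3 : 2*s % 3 = 0 ∧ 3 ≤ 2*s ∧ 2*s/3 ≤ s
  · rw [if_pos h3]
    have b3 : mval (2*s/3) + 1 ≤ 100000000 := by
      have := mval_small (show 2*s/3 ≤ 2^31 from by omega); omega
    omega
  · rw [if_neg h3]
    omega

lemma key3 (s : Nat) (h1 : 1 ≤ s) (hs : s ≤ 2^31) :
    min (pval (s-1) (3*s)) (mval s + 1) = pval s (3*s) := by
  have hbs : mval s + 1 ≤ 100000000 := by have := mval_small hs; omega
  unfold pval
  rw [if_neg (show ¬(3*s % 2 = 0 ∧ 2 ≤ 3*s ∧ 3*s/2 ≤ s-1) from by omega),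
      if_neg (show ¬(3*s % 2 = 0 ∧ 2 ≤ 3*s ∧ 3*s/2 ≤ s) from by omega),
      if_neg (show ¬(3*s % 3 = 0 ∧ 3 ≤ 3*s ∧ 3*s/3 ≤ s-1) from by omega),
      if_pos (show 3*s % 3 = 0 ∧ 3 ≤ 3*s ∧ 3*s/3 ≤ s from by omega),
      show 3*s/3 = s from by omega]
  omega

lemma key4 (s j : Nat) (h1 : 1 ≤ s) (hj2 : j ≠ 2*s) (hj3 : j ≠ 3*s) :
    pval (s-1) j = pval s j := by
  unfold pval
  have e2 : (j % 2 = 0 ∧ 2 ≤ j ∧ j / 2 ≤ s-1) ↔ (j % 2 = 0 ∧ 2 ≤ j ∧ j / 2 ≤ s) := by omega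
  have e3 : (j % 3 = 0 ∧ 3 ≤ j ∧ j / 3 ≤ s-1) ↔ (j % 3 = 0 ∧ 3 ≤ j ∧ j / 3 ≤ s) := by omega
  rw [if_congr e2 rfl rfl, if_congr e3 rfl rfl]

lemma stepB_point (N i : Nat) (hi : i+1 ≤ N) (hN : N ≤ 2^31) (j : Nat) (hj : j < N+1) :
    (if j = 3*(i+1) then
       min (if j = 2*(i+1) then
              min (if j = i+2 then
                     min (if j ≤ i+1 then mval j else pval i j) (mval (i+1) + 1)
                   else if j ≤ i+1 then mval j else pval i j) (mval (i+1) + 1)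
            else if j = i+2 then
              min (if j ≤ i+1 then mval j else pval i j) (mval (i+1) + 1)
            else if j ≤ i+1 then mval j else pval i j) (mval (i+1) + 1)
     else if j = 2*(i+1) then
       min (if j = i+2 then
              min (if j ≤ i+1 then mval j else pval i j) (mval (i+1) + 1)
            else if j ≤ i+1 then mval j else pval i j) (mval (i+1) + 1)
     else if j = i+2 then
       min (if j ≤ i+1 then mval j else pval i j) (mval (i+1) + 1)
     else if j ≤ i+1 then mval j else pval i j)
    = (if j ≤ i+1+1 then mval j else pval (i+1) j) := by
  have hs : i+1 ≤ 2^31 := by omega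
  have ei : (i+1)-1 = i := by omega
  by_cases hj1 : j ≤ i+1
  · simp only [eq_false (show ¬ j = 3*(i+1) from by omega),
      eq_false (show ¬ j = 2*(i+1) from by omega),
      eq_false (show ¬ j = i+2 from by omega),
      eq_true hj1, eq_true (show j ≤ i+1+1 from by omega), if_true, if_false]
  · by_cases hj2 : j = i+2
    · subst hj2
      by_cases hi0 : i = 0
      · subst hi0
        simp only [eq_false (show ¬ (0:Nat)+2 = 3*(0+1) from by omega),
          eq_false (show ¬ (0:Nat)+2 ≤ 0+1 from by omega),
          eq_true (show (0:Nat)+2 ≤ 0+1+1 from by omega), if_true, if_false]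
        rw [min_assoc, min_self]
        simpa using key1 1 (le_refl 1) (by norm_num)
      · simp only [eq_false (show ¬ i+2 = 3*(i+1) from by omega),
          eq_false (show ¬ i+2 = 2*(i+1) from by omega),
          eq_false (show ¬ i+2 ≤ i+1 from by omega),
          eq_true (show i+2 ≤ i+1+1 from by omega), if_true, if_false]
        have h := key1 (i+1) (by omega) hs
        rw [ei] at h
        rw [show i+1+1 = i+2 from by omega] at h
        exact h
    · by_cases hj3 : j = 2*(i+1)
      · subst hj3
        simp only [eq_false (show ¬ 2*(i+1) = 3*(i+1) from by omega),
          eq_false (show ¬ 2*(i+1) = i+2 from by omega),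
          eq_false (show ¬ 2*(i+1) ≤ i+1 from by omega),
          eq_false (show ¬ 2*(i+1) ≤ i+1+1 from by omega), if_true, if_false]
        have h := key2 (i+1) (by omega) hs
        rw [ei] at h
        exact h
      · by_cases hj4 : j = 3*(i+1)
        · subst hj4
          simp only [eq_false (show ¬ 3*(i+1) = 2*(i+1) from by omega),
            eq_false (show ¬ 3*(i+1) = i+2 from by omega),
            eq_false (show ¬ 3*(i+1) ≤ i+1 from by omega),
            eq_false (show ¬ 3*(i+1) ≤ i+1+1 from by omega), if_true, if_false]
          have h := key3 (i+1) (by omega) hs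
          rw [ei] at h
          exact h
        · simp only [eq_false hj4, eq_false hj3, eq_false hj2, eq_false hj1,
            eq_false (show ¬ j ≤ i+1+1 from by omega), if_false]
          have h := key4 (i+1) j (by omega) hj3 hj4
          rw [ei] at h
          exact h

lemma stepB_state (N i : Nat) (hi : i+1 ≤ N) (hN : N ≤ 2^31) :
    stepBfun (N:Int) (stateB i N) ((i+1:Nat):Int) = stateB (i+1) N := by
  unfold stepBfun stateB
  rw [PySem.List.pyGetD_natCast]
  rw [List.getD_eq_getElem _ _ (by simp; omega)]
  simp only [List.getElem_map, List.getElem_range]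
  rw [if_pos (le_refl (i+1))]
  have c1 : ((i+1:Nat):Int)+1 = ((i+2:Nat):Int) := by push_cast; ring
  have c2 : 2*((i+1:Nat):Int) = ((2*(i+1):Nat):Int) := by push_cast; ring
  have c3 : 3*((i+1:Nat):Int) = ((3*(i+1):Nat):Int) := by push_cast; ring
  rw [c1, relax_map, c2, relax_map, c3, relax_map]
  refine List.map_congr_left ?_
  intro j hjm
  simp only [List.mem_range] at hjm
  simpa using stepB_point N i hi hN j hjm

lemma initB (N : Nat) :
    PySem.List.pySetD (PySem.List.pySetD
      (List.replicate ((N:Int)+1).toNat (100000000:Int)) 0 0) 1 0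
    = stateB 0 N := by
  rw [PySem.List.pySetD_of_nonneg _ _ (show (0:Int) ≤ 1 by norm_num),
      PySem.List.pySetD_of_nonneg _ _ (show (0:Int) ≤ 0 by norm_num)]
  norm_num
  apply List.ext_getElem
  · simp [stateB]
  · intro j hj1 hj2
    simp only [stateB, List.getElem_set, List.getElem_map, List.getElem_range,
      List.getElem_replicate]
    by_cases hj0 : j = 0
    · subst hj0; simp [mval_zero]
    · by_cases hjo : j = 1
      · subst hjo; simp [mval_one]
      · rw [if_neg (by omega), if_neg (by omega), if_neg (by omega),
            pval_zero j (by omega)]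

lemma foldB (N : Nat) (hN : N ≤ 2^31) : ∀ k, k ≤ N →
    (PySem.List.pyRange 1 ((k:Int)+1) 1).foldl (stepBfun (N:Int)) (stateB 0 N) = stateB k N := by
  intro k
  induction k with
  | zero =>
    intro _
    rw [PySem.List.pyRange_one_eq_nil (by omega)]
    rfl
  | succ k ih =>
    intro hk
    have e : ((k+1:Nat):Int)+1 = ((k:Int)+1)+1 := by push_cast; ring
    rw [e, PySem.List.pyRange_one_succ_right (by omega), List.foldl_append,
        ih (by omega)]
    simp only [List.foldl_cons, List.foldl_nil]
    have e2 : ((k:Int)+1) = ((k+1:Nat):Int) := by push_cast; ring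
    rw [e2, stepB_state N k (by omega) hN]

lemma B_eq (N : Nat) (hN : N ≤ 2^31) :
    compute_steps_alt (N : Int) = stateB N N := by
  have h0 : compute_steps_alt (N : Int) =
      (PySem.List.pyRange 1 ((N:Int)+1) 1).foldl (stepBfun (N:Int))
        (PySem.List.pySetD (PySem.List.pySetD
          (List.replicate ((N:Int)+1).toNat (100000000:Int)) 0 0) 1 0) := rfl
  rw [h0, initB N, foldB N hN N (le_refl N)]

-- ===== VERDICT (by name: the statement is the Claim_ definition above) =====
theorem compute_steps_spec : Claim_equal_compute_steps := by
  intro n hdom hpre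
  unfold Spec_compute_steps
  have hpre' : 1 ≤ n := hpre
  have hn : n = ((n.toNat : Nat) : Int) := by omega
  have h1 : 1 ≤ n.toNat := by omega
  have h2 : n.toNat ≤ 2^31 := by
    unfold Dom_compute_steps pvDomInt at hdom
    simp at hdom
    omega
  rw [hn, A_eq _ h1, B_eq _ h2]
  unfold stateA stateB
  refine List.map_congr_left ?_
  intro j hj
  simp only [List.mem_range] at hj
  have hje : j ≤ n.toNat := by omega
  simp [hje, Nat.le_succ_of_le hje]
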